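-- pv_equiv track=rewrite | github.com/Royosef/gemzy-services | packages/prompting/prompting/registry.py | _build_size_negative_segments
-- ===== SOURCE A (Python) =====
-- from typing import Any, Iterable
--
-- def _normalize_string(value: Any) -> Any:
--     if isinstance(value, str):
--         return value.strip().lower()
--     return value
--
-- def _normalize_size_label(value: str | None) -> str:
--     return (value or "").strip()
--
-- def _build_size_negative_segments(items: list[dict[str, Any]] | None) -> list[str]:
--     sizes = {
--         _normalize_string(item.get("size"))
--         for item in (items or [])
--         if _normalize_size_label(item.get("size"))
--     }
--
--     negatives: list[str] = []
--     if not sizes.intersection({"big", "very big"}):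
--         negatives.append("oversized jewelry")
--     if not sizes.intersection({"small", "very small"}):
--         negatives.append("tiny jewelry")
--     return negatives
-- ===== SOURCE B (Python) =====
-- from typing import Any
--
-- _SIZE_BITS = {"big": 1, "very big": 1, "small": 2, "very small": 2}
-- _NEGATIVES = {
--     0: ["oversized jewelry", "tiny jewelry"],
--     1: ["tiny jewelry"],
--     2: ["oversized jewelry"],
--     3: [],
-- }
--
--
-- def _normalize_string(value: Any) -> Any:
--     if isinstance(value, str):
--         return value.strip().lower()
--     return value
--
--
-- def _normalize_size_label(value: str | None) -> str:
--     return (value or "").strip()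
--
--
-- def _build_size_negative_segments(items: list[dict[str, Any]] | None) -> list[str]:
--     mask = 0
--     for item in (items or []):
--         if _normalize_size_label(item.get("size")):
--             mask |= _SIZE_BITS.get(_normalize_string(item.get("size")), 0)
--     return list(_NEGATIVES[mask])
-- ===== Notes on version B (the rewrite author's own statement) =====
-- stated objective: alternative
-- what changed: B replaces A's set comprehension and two set-intersection tests with a bitmask accumulated via a hash table mapping each size label to a bit (no set, no membership tests against sentinel pairs), and the result is read off a precomputed 4-entry table indexed by the mask.
import Mathlib
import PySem

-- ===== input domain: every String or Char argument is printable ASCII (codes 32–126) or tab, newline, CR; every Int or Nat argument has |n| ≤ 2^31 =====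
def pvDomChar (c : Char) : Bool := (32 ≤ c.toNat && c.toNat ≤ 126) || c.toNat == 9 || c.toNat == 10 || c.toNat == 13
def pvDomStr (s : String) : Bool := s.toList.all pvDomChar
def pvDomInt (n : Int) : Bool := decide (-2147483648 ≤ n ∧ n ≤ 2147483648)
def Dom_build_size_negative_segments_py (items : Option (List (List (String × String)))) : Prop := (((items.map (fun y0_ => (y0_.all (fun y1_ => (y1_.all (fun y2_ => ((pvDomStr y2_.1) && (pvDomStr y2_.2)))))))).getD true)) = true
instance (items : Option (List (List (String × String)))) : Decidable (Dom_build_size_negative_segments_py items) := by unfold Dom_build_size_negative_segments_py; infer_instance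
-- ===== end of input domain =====

-- B replaces A's set + intersection tests by a bitmask accumulated through a bit table
-- and a 4-entry result table indexed by the mask; objective: alternative formulation.


-- ===== PORT A =====
-- _normalize_string on a string value: value.strip().lower()
def normalize_string_py (value : String) : String :=
  PySem.Str.lower (PySem.Str.strip value)

-- _normalize_size_label: (value or "").strip()  (None → "")
def normalize_size_label_py (value : Option String) : String :=
  PySem.Str.strip (value.getD "")

def build_size_negative_segments_py (items : Option (List (List (String × String)))) : List String :=
  let sizes : PySem.Set String :=
    (items.getD []).foldl
      (fun s item =>
        if normalize_size_label_py ((PySem.Dict.mk item).get? "size") ≠ "" then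
          PySem.Set.add s (normalize_string_py ((((PySem.Dict.mk item).get? "size").getD "")))
        else s)
      PySem.Set.empty
  let negatives : List String :=
    (if PySem.Set.inter sizes (PySem.Set.ofList ["big", "very big"]) = [] then
      ["oversized jewelry"] else []) ++
    (if PySem.Set.inter sizes (PySem.Set.ofList ["small", "very small"]) = [] then
      ["tiny jewelry"] else [])
  negatives

-- ===== PORT B =====
-- _SIZE_BITS: hash table sending each size label to its bit contribution
def sizeBits : PySem.Dict String Nat :=
  PySem.Dict.mk [("big", 1), ("very big", 1), ("small", 2), ("very small", 2)]

-- _NEGATIVES: result table indexed by the mask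
def negTable : PySem.Dict Nat (List String) :=
  PySem.Dict.mk [(0, ["oversized jewelry", "tiny jewelry"]), (1, ["tiny jewelry"]),
                 (2, ["oversized jewelry"]), (3, [])]

def build_size_negative_segments_py_alt (items : Option (List (List (String × String)))) : List String :=
  let mask : Nat :=
    (items.getD []).foldl
      (fun m item =>
        if normalize_size_label_py ((PySem.Dict.mk item).get? "size") ≠ "" then
          m ||| PySem.Dict.getD sizeBits
            (normalize_string_py ((((PySem.Dict.mk item).get? "size").getD ""))) 0
        else m)
      0
  -- _NEGATIVES[mask]: mask is always 0..3, a key of the table, so the lookup never raises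
  (PySem.Dict.get? negTable mask).getD []

-- ===== PRECONDITION & SPEC =====
def Spec_build_size_negative_segments_py (items : Option (List (List (String × String)))) (out : List String) : Prop := out = build_size_negative_segments_py_alt items
instance (items : Option (List (List (String × String)))) (out : List String) : Decidable (Spec_build_size_negative_segments_py items out) := by unfold Spec_build_size_negative_segments_py; infer_instance

-- ===== CLAIM (what is proved, stated in full; the proofs are below) =====
def Claim_equal_build_size_negative_segments_py : Prop := ∀ (items : Option (List (List (String × String)))), Dom_build_size_negative_segments_py items → Spec_build_size_negative_segments_py items (build_size_negative_segments_py items)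

-- ===== LEMMAS AND PROOFS =====

-- the bitmask encoding of the two membership facts
def encodeMask (L S : Bool) : Nat := (if L then 1 else 0) + (if S then 2 else 0)

theorem lor_one (L S : Bool) : encodeMask L S ||| 1 = encodeMask true S := by
  cases L <;> cases S <;> decide

theorem lor_two (L S : Bool) : encodeMask L S ||| 2 = encodeMask L true := by
  cases L <;> cases S <;> decide

theorem lor_zero (L S : Bool) : encodeMask L S ||| 0 = encodeMask L S := by
  cases L <;> cases S <;> decide

-- bit of a label outside the table is 0
theorem bit_other (v : String) (h1 : v ≠ "big") (h2 : v ≠ "very big")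
    (h3 : v ≠ "small") (h4 : v ≠ "very small") :
    PySem.Dict.getD sizeBits v 0 = 0 := by
  have b1 : ("big" == v) = false := by simp [Ne.symm h1]
  have b2 : ("very big" == v) = false := by simp [Ne.symm h2]
  have b3 : ("small" == v) = false := by simp [Ne.symm h3]
  have b4 : ("very small" == v) = false := by simp [Ne.symm h4]
  simp [sizeBits, PySem.Dict.getD, b1, b2, b3, b4, PySem.Dict.get?]

-- intersection of a set with a two-element set is empty iff neither element is in it
theorem inter_pair_eq_nil_iff (s : List String) (a b : String) :
    PySem.Set.inter s (PySem.Set.ofList [a, b]) = [] ↔ (a ∉ s ∧ b ∉ s) := by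
  simp only [PySem.Set.inter, List.filter_eq_nil_iff, PySem.Set.contains_eq_listContains,
    List.contains_iff_mem, PySem.Set.mem_ofList]
  constructor
  · intro h
    refine ⟨fun ha => h a ha ?_, fun hb => h b hb ?_⟩ <;> simp
  · rintro ⟨ha, hb⟩ x hx hmem
    simp only [List.mem_cons, List.not_mem_nil, or_false] at hmem
    rcases hmem with h | h
    · exact ha (h ▸ hx)
    · exact hb (h ▸ hx)

-- the loop invariant: the mask encodes exactly the large/small membership of A's set
theorem mask_track (l : List (List (String × String))) :
    ∀ (s : PySem.Set String) (m : Nat),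
    m = encodeMask (decide ("big" ∈ s ∨ "very big" ∈ s)) (decide ("small" ∈ s ∨ "very small" ∈ s)) →
    (l.foldl
      (fun m item =>
        if normalize_size_label_py ((PySem.Dict.mk item).get? "size") ≠ "" then
          m ||| PySem.Dict.getD sizeBits
            (normalize_string_py ((((PySem.Dict.mk item).get? "size").getD ""))) 0
        else m)
      m) =
    encodeMask
      (decide ("big" ∈ (l.foldl
        (fun s item =>
          if normalize_size_label_py ((PySem.Dict.mk item).get? "size") ≠ "" then
            PySem.Set.add s (normalize_string_py ((((PySem.Dict.mk item).get? "size").getD "")))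
          else s) s) ∨ "very big" ∈ (l.foldl
        (fun s item =>
          if normalize_size_label_py ((PySem.Dict.mk item).get? "size") ≠ "" then
            PySem.Set.add s (normalize_string_py ((((PySem.Dict.mk item).get? "size").getD "")))
          else s) s)))
      (decide ("small" ∈ (l.foldl
        (fun s item =>
          if normalize_size_label_py ((PySem.Dict.mk item).get? "size") ≠ "" then
            PySem.Set.add s (normalize_string_py ((((PySem.Dict.mk item).get? "size").getD "")))
          else s) s) ∨ "very small" ∈ (l.foldl
        (fun s item =>
          if normalize_size_label_py ((PySem.Dict.mk item).get? "size") ≠ "" then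
            PySem.Set.add s (normalize_string_py ((((PySem.Dict.mk item).get? "size").getD "")))
          else s) s))) := by
  induction l with
  | nil => intro s m hm; exact hm
  | cons item rest ih =>
    intro s m hm
    simp only [List.foldl_cons]
    by_cases hne : normalize_size_label_py ((PySem.Dict.mk item).get? "size") ≠ ""
    · simp only [if_pos hne]
      set v := normalize_string_py ((((PySem.Dict.mk item).get? "size").getD "")) with hv
      by_cases hbig : v = "big" ∨ v = "very big"
      · have hb1 : PySem.Dict.getD sizeBits v 0 = 1 := by
          rcases hbig with h | h <;> rw [h] <;> decide
        rw [hb1]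
        apply ih
        rw [hm, lor_one]
        refine congrArg₂ encodeMask ?_ ?_
        · simp only [PySem.Set.mem_add]
          rcases hbig with h | h <;> simp [h]
        · simp only [PySem.Set.mem_add]
          rw [decide_eq_decide]
          constructor
          · intro h; rcases h with h | h
            · exact Or.inl (Or.inl h)
            · exact Or.inr (Or.inl h)
          · rintro (h | h) <;> rcases h with h | h
            · exact Or.inl h
            · rcases hbig with hb | hb <;> rw [hb] at h <;> simp at h
            · exact Or.inr h
            · rcases hbig with hb | hb <;> rw [hb] at h <;> simp at h
      · by_cases hsmall : v = "small" ∨ v = "very small"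
        · have hb2 : PySem.Dict.getD sizeBits v 0 = 2 := by
            rcases hsmall with h | h <;> rw [h] <;> decide
          rw [hb2]
          apply ih
          rw [hm, lor_two]
          refine congrArg₂ encodeMask ?_ ?_
          · simp only [PySem.Set.mem_add]
            rw [decide_eq_decide]
            constructor
            · intro h; rcases h with h | h
              · exact Or.inl (Or.inl h)
              · exact Or.inr (Or.inl h)
            · rintro (h | h) <;> rcases h with h | h
              · exact Or.inl h
              · rcases hsmall with hb | hb <;> rw [hb] at h <;> simp at h
              · exact Or.inr h
              · rcases hsmall with hb | hb <;> rw [hb] at h <;> simp at h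
          · simp only [PySem.Set.mem_add]
            rcases hsmall with h | h <;> simp [h]
        · have hb0 : PySem.Dict.getD sizeBits v 0 = 0 :=
            bit_other v (fun h => hbig (Or.inl h)) (fun h => hbig (Or.inr h))
              (fun h => hsmall (Or.inl h)) (fun h => hsmall (Or.inr h))
          rw [hb0]
          apply ih
          rw [hm, lor_zero]
          refine congrArg₂ encodeMask ?_ ?_
          · simp only [PySem.Set.mem_add]
            rw [decide_eq_decide]
            constructor
            · intro h; rcases h with h | h
              · exact Or.inl (Or.inl h)
              · exact Or.inr (Or.inl h)
            · rintro (h | h) <;> rcases h with h | h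
              · exact Or.inl h
              · exact absurd (Or.inl h.symm) hbig
              · exact Or.inr h
              · exact absurd (Or.inr h.symm) hbig
          · simp only [PySem.Set.mem_add]
            rw [decide_eq_decide]
            constructor
            · intro h; rcases h with h | h
              · exact Or.inl (Or.inl h)
              · exact Or.inr (Or.inl h)
            · rintro (h | h) <;> rcases h with h | h
              · exact Or.inl h
              · exact absurd (Or.inl h.symm) hsmall
              · exact Or.inr h
              · exact absurd (Or.inr h.symm) hsmall
    · simp only [if_neg hne]
      exact ih s m hm

theorem final_shape (s : PySem.Set String) :
    (if PySem.Set.inter s (PySem.Set.ofList ["big", "very big"]) = [] then ["oversized jewelry"] else ([] : List String)) ++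
      (if PySem.Set.inter s (PySem.Set.ofList ["small", "very small"]) = [] then ["tiny jewelry"] else []) =
    (PySem.Dict.get? negTable
      (encodeMask (decide ("big" ∈ s ∨ "very big" ∈ s)) (decide ("small" ∈ s ∨ "very small" ∈ s)))).getD [] := by
  rw [if_congr (inter_pair_eq_nil_iff s "big" "very big") rfl rfl,
    if_congr (inter_pair_eq_nil_iff s "small" "very small") rfl rfl]
  rw [if_congr (Iff.symm not_or) rfl rfl, if_congr (Iff.symm not_or) rfl rfl]
  by_cases hL : ("big" ∈ s ∨ "very big" ∈ s) <;> by_cases hS : ("small" ∈ s ∨ "very small" ∈ s) <;>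
    simp [hL, hS, encodeMask, negTable, PySem.Dict.get?_mk_cons]

-- ===== VERDICT (by name: the statement is the Claim_ definition above) =====
theorem build_size_negative_segments_py_spec : Claim_equal_build_size_negative_segments_py := by
  intro items _
  unfold Spec_build_size_negative_segments_py
  unfold build_size_negative_segments_py build_size_negative_segments_py_alt
  rw [mask_track (items.getD []) PySem.Set.empty 0 (by simp [PySem.Set.empty, encodeMask])]
  exact final_shape _
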